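-- pv_equiv track=rewrite | github.com/Dirk-Tunderman/email_management | src/lib/imap_tools_based_functions.py | _extract_email_headers
-- ===== SOURCE A (Python) =====
-- from typing import List, Dict, Optional
--
-- def _extract_email_headers(message: Dict) -> Dict:
--     """Extract relevant headers from the email message"""
--     headers = {}
--
--     if 'internetMessageHeaders' in message:
--         header_map = {
--             header['name'].lower(): header['value']
--             for header in message['internetMessageHeaders']
--         }
--
--         # Thread-related headers
--         headers.update({
--             'thread_topic': header_map.get('thread-topic'),
--             'thread_index': header_map.get('thread-index'),
--             'references': header_map.get('references'),
--             'in_reply_to': header_map.get('in-reply-to'),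
--             'message_id': header_map.get('message-id'),
--         })
--
--         # Security and authentication headers
--         headers.update({
--             'authentication_results': header_map.get('authentication-results'),
--             'dkim_signature': header_map.get('dkim-signature'),
--             'arc_authentication_results': header_map.get('arc-authentication-results'),
--             'ms_antispam': header_map.get('x-microsoft-antispam'),
--         })
--
--         # Routing headers
--         headers.update({
--             'return_path': header_map.get('return-path'),
--             'network_message_id': header_map.get('x-ms-exchange-organization-network-message-id'),
--             'tenant_id': header_map.get('x-ms-exchange-crosstenant-id'),
--             'transport_latency': header_map.get('x-ms-exchange-transport-endtoendlatency'),
--         })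
--
--         # Classification headers
--         headers.update({
--             'scl': header_map.get('x-ms-exchange-organization-scl'),
--             'traffic_type': header_map.get('x-ms-publictraffictype'),
--             'directionality': header_map.get('x-ms-exchange-organization-messagedirectionality'),
--         })
--
--     return headers
-- ===== SOURCE B (Python) =====
-- # B: no intermediate index -- for each wanted header, a direct reverse linear search
-- # over the header list (first match scanning backwards = "last duplicate wins").
-- _WANTED = [
--     ('thread-topic', 'thread_topic'),
--     ('thread-index', 'thread_index'),
--     ('references', 'references'),
--     ('in-reply-to', 'in_reply_to'),
--     ('message-id', 'message_id'),
--     ('authentication-results', 'authentication_results'),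
--     ('dkim-signature', 'dkim_signature'),
--     ('arc-authentication-results', 'arc_authentication_results'),
--     ('x-microsoft-antispam', 'ms_antispam'),
--     ('return-path', 'return_path'),
--     ('x-ms-exchange-organization-network-message-id', 'network_message_id'),
--     ('x-ms-exchange-crosstenant-id', 'tenant_id'),
--     ('x-ms-exchange-transport-endtoendlatency', 'transport_latency'),
--     ('x-ms-exchange-organization-scl', 'scl'),
--     ('x-ms-publictraffictype', 'traffic_type'),
--     ('x-ms-exchange-organization-messagedirectionality', 'directionality'),
-- ]
--
-- def _extract_email_headers(message):
--     """Extract relevant headers from the email message"""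
--     if 'internetMessageHeaders' not in message:
--         return {}
--     hdrs = message['internetMessageHeaders']
--     headers = {}
--     for wanted, key in _WANTED:
--         value = None
--         for header in reversed(hdrs):
--             if header['name'].lower() == wanted:
--                 value = header['value']
--                 break
--         headers[key] = value
--     return headers
-- ===== Notes on version B (the rewrite author's own statement) =====
-- stated objective: alternative
-- what changed: A builds a full lowercased name->value index over all headers and then performs 16 fixed lookups; B builds no index at all: for each of the 16 wanted headers it does a direct reverse linear search of the header list (first match scanning backwards reproduces last-duplicate-wins), trading the one-pass index for 16 staged searches.
import Mathlib
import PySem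

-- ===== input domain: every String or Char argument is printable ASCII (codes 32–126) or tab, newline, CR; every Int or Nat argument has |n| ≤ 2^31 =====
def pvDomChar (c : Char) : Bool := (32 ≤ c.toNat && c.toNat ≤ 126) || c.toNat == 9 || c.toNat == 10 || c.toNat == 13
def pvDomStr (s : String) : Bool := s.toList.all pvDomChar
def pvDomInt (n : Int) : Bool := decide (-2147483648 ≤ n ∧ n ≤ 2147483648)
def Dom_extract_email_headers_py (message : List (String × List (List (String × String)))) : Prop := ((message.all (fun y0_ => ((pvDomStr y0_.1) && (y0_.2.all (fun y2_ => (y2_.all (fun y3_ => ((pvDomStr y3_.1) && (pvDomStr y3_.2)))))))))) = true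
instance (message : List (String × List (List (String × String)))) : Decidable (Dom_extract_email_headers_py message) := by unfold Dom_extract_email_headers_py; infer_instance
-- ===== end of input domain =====

-- B builds no name->value index: for each of the 16 wanted headers it searches the
-- header list in reverse (first backwards match = last-duplicate-wins); same return value as A.

-- ===== PORT A =====
def extract_email_headers_py (message : List (String × List (List (String × String)))) : List (String × Option String) :=
  let msg := PySem.Dict.mk message
  if msg.contains "internetMessageHeaders" then
    let header_map : PySem.Dict String String :=
      (msg.getD "internetMessageHeaders" []).foldl
        (fun d h => d.insert (PySem.Str.lower ((PySem.Dict.mk h).getD "name" ""))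
                             ((PySem.Dict.mk h).getD "value" ""))
        PySem.Dict.empty
    [("thread_topic", header_map.get? "thread-topic"),
     ("thread_index", header_map.get? "thread-index"),
     ("references", header_map.get? "references"),
     ("in_reply_to", header_map.get? "in-reply-to"),
     ("message_id", header_map.get? "message-id"),
     ("authentication_results", header_map.get? "authentication-results"),
     ("dkim_signature", header_map.get? "dkim-signature"),
     ("arc_authentication_results", header_map.get? "arc-authentication-results"),
     ("ms_antispam", header_map.get? "x-microsoft-antispam"),
     ("return_path", header_map.get? "return-path"),
     ("network_message_id", header_map.get? "x-ms-exchange-organization-network-message-id"),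
     ("tenant_id", header_map.get? "x-ms-exchange-crosstenant-id"),
     ("transport_latency", header_map.get? "x-ms-exchange-transport-endtoendlatency"),
     ("scl", header_map.get? "x-ms-exchange-organization-scl"),
     ("traffic_type", header_map.get? "x-ms-publictraffictype"),
     ("directionality", header_map.get? "x-ms-exchange-organization-messagedirectionality")]
  else []

-- ===== PORT B =====
-- module-level constant _WANTED of Source B (wanted lowercased name, output key)
def pvWanted : List (String × String) :=
  [("thread-topic", "thread_topic"),
   ("thread-index", "thread_index"),
   ("references", "references"),
   ("in-reply-to", "in_reply_to"),
   ("message-id", "message_id"),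
   ("authentication-results", "authentication_results"),
   ("dkim-signature", "dkim_signature"),
   ("arc-authentication-results", "arc_authentication_results"),
   ("x-microsoft-antispam", "ms_antispam"),
   ("return-path", "return_path"),
   ("x-ms-exchange-organization-network-message-id", "network_message_id"),
   ("x-ms-exchange-crosstenant-id", "tenant_id"),
   ("x-ms-exchange-transport-endtoendlatency", "transport_latency"),
   ("x-ms-exchange-organization-scl", "scl"),
   ("x-ms-publictraffictype", "traffic_type"),
   ("x-ms-exchange-organization-messagedirectionality", "directionality")]

-- the inner 'for header in reversed(hdrs): if … : value = …; break' loop of Source B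
def pvFindVal (hs : List (List (String × String))) (wanted : String) : Option String :=
  (hs.reverse.find? (fun h => PySem.Str.lower ((PySem.Dict.mk h).getD "name" "") == wanted)).map
    (fun h => (PySem.Dict.mk h).getD "value" "")

def extract_email_headers_py_alt (message : List (String × List (List (String × String)))) : List (String × Option String) :=
  let msg := PySem.Dict.mk message
  if msg.contains "internetMessageHeaders" = false then []
  else
    let hdrs := msg.getD "internetMessageHeaders" []
    (pvWanted.foldl (fun d p => d.insert p.2 (pvFindVal hdrs p.1)) PySem.Dict.empty).items

-- ===== PRECONDITION & SPEC =====
-- Pre_ excludes only inputs on which Python A raises KeyError: a header dict under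
-- 'internetMessageHeaders' lacking the 'name' or 'value' key.
def Pre_extract_email_headers_py (message : List (String × List (List (String × String)))) : Prop :=
  (((PySem.Dict.mk message).getD "internetMessageHeaders" []).all
    (fun h => (PySem.Dict.mk h).contains "name" && (PySem.Dict.mk h).contains "value")) = true
instance (message : List (String × List (List (String × String)))) : Decidable (Pre_extract_email_headers_py message) := by unfold Pre_extract_email_headers_py; infer_instance

def pvWitness_extract_email_headers_py : (List (String × List (List (String × String)))) :=
  [("internetMessageHeaders", [[("name", "Thread-Topic"), ("value", "hello")], [("name", "Message-ID"), ("value", "<abc@x>")], [("name", "X-Other"), ("value", "1")]])]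

def Spec_extract_email_headers_py (message : List (String × List (List (String × String)))) (out : List (String × Option String)) : Prop := out = extract_email_headers_py_alt message
instance (message : List (String × List (List (String × String)))) (out : List (String × Option String)) : Decidable (Spec_extract_email_headers_py message out) := by unfold Spec_extract_email_headers_py; infer_instance

-- ===== CLAIM (what is proved, stated in full; the proofs are below) =====
def Claim_equal_extract_email_headers_py : Prop := ∀ (message : List (String × List (List (String × String)))), Dom_extract_email_headers_py message → Pre_extract_email_headers_py message → Spec_extract_email_headers_py message (extract_email_headers_py message)

-- ===== LEMMAS AND PROOFS =====

-- A's per-header update of header_map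
def pvStepA (d : PySem.Dict String String) (h : List (String × String)) : PySem.Dict String String :=
  d.insert (PySem.Str.lower ((PySem.Dict.mk h).getD "name" "")) ((PySem.Dict.mk h).getD "value" "")

-- A's index lookup = B's reverse search, relative to the starting dict
theorem pvGet_fold (hs : List (List (String × String))) (m : PySem.Dict String String) (w : String) :
    (hs.foldl pvStepA m).get? w = (pvFindVal hs w).orElse (fun _ => m.get? w) := by
  induction hs generalizing m with
  | nil => simp [pvFindVal]
  | cons h t ih =>
    simp only [List.foldl_cons, ih, pvFindVal, List.reverse_cons, List.find?_append]
    cases hf : t.reverse.find? (fun h => PySem.Str.lower ((PySem.Dict.mk h).getD "name" "") == w) with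
    | some h' => simp
    | none =>
      simp only [Option.orElse, pvStepA]
      by_cases he : w = PySem.Str.lower ((PySem.Dict.mk h).getD "name" "")
      · simp [List.find?, he, PySem.Dict.get?_insert_self]
      · have : (PySem.Str.lower ((PySem.Dict.mk h).getD "name" "") == w) = false := by
          simp; exact fun hh => he hh.symm
        simp [List.find?, this, PySem.Dict.get?_insert_of_ne _ _ he]

-- ===== VERDICT (by name: the statement is the Claim_ definition above) =====
theorem extract_email_headers_py_spec : Claim_equal_extract_email_headers_py := by
  intro message _ _
  unfold Spec_extract_email_headers_py extract_email_headers_py extract_email_headers_py_alt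
  cases hc : (PySem.Dict.mk message).contains "internetMessageHeaders" with
  | false => simp [hc]
  | true =>
    simp only [hc, if_true, Bool.true_eq_false, if_false]
    set hdrs := (PySem.Dict.mk message).getD "internetMessageHeaders" [] with hh
    rw [PySem.Dict.items_foldl_insert_fresh (k := fun p : String × String => p.2)
          (v := fun p => pvFindVal hdrs p.1) (l := pvWanted) (d := PySem.Dict.empty)
          (by decide) (by decide)]
    show _ = [] ++ pvWanted.map (fun p => (p.2, pvFindVal hdrs p.1))
    have hg : ∀ w, (List.foldl (fun (d : PySem.Dict String String) h => d.insert (PySem.Str.lower ((PySem.Dict.mk h).getD "name" "")) ((PySem.Dict.mk h).getD "value" "")) PySem.Dict.empty hdrs).get? w = pvFindVal hdrs w := by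
      intro w
      have h0 : (hdrs.foldl pvStepA PySem.Dict.empty).get? w = pvFindVal hdrs w := by
        rw [pvGet_fold]; cases pvFindVal hdrs w <;> rfl
      exact h0
    simp [pvWanted, hg]
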